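-- pv_equiv track=rewrite | github.com/cisco-open/network-sketcher | network-sketcher_online/ns_engine/nsm_l3_svg_create.py | _split_capture_by_area
-- ===== SOURCE A (Python) =====
-- def _split_capture_by_area(capture_list):
--     """Split capture list into per-area groups.
--
--     In l3_area_create, the CREATE pass draws shapes in this order:
--       DEVICE_NORMAL/TAG_NORMAL/WAY_POINT_NORMAL → FOLDER_NORMAL →
--       L3_SEGMENT_GRAY/connector LINES → OUTLINE_NORMAL → IP_ADDRESS_TAG → L3_INSTANCE lines
--
--     Because OUTLINE_NORMAL is drawn AFTER the device shapes, a naive split at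
--     OUTLINE_NORMAL would place each area's OUTLINE and IP labels into the NEXT
--     area's group (off-by-one).
--
--     This corrected version splits at OUTLINE_NORMAL boundaries but then moves
--     the OUTLINE_NORMAL + its trailing IP labels / L3-instance lines back to the
--     group they logically belong to (the one that contains the corresponding
--     FOLDER_NORMAL with the same area name).
--     """
--     # Step 1: raw split at each OUTLINE_NORMAL
--     # raw_groups[0] = shapes before first OUTLINE  (= area-0 devices, no OUTLINE)
--     # raw_groups[k] = [OUTLINE_{k-1}, IP_{k-1}, L3inst_{k-1}, area-k devices ...]
--     raw_groups = []
--     current = []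
--     for item in capture_list:
--         if item[0] == 'shape' and item[1] == 'OUTLINE_NORMAL':
--             raw_groups.append(current)
--             current = [item]
--         else:
--             current.append(item)
--     if current:
--         raw_groups.append(current)
--
--     if not raw_groups:
--         return []
--
--     def _split_tail(items):
--         """
--         Given a raw group that starts with OUTLINE_NORMAL, separate it into:
--           tail  – OUTLINE_NORMAL + immediately following IP_ADDRESS_TAG shapes
--                   and L3_INSTANCE lines  (all belong to the *previous* area)
--           head  – everything else (start of the *next* area's device shapes)
--         """
--         if not items or not (items[0][0] == 'shape' and
--                               items[0][1] == 'OUTLINE_NORMAL'):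
--             return [], items
--         i = 1
--         while i < len(items):
--             it = items[i]
--             if it[0] == 'shape' and it[1] == 'IP_ADDRESS_TAG':
--                 i += 1
--             elif it[0] == 'line':
--                 i += 1
--             else:
--                 break
--         return items[:i], items[i:]
--
--     # Step 2: rebuild correct per-area groups
--     areas = []
--     for i, raw in enumerate(raw_groups):
--         if i == 0:
--             # First raw group has no OUTLINE – it is purely area-0 device shapes
--             areas.append(list(raw))
--         else:
--             tail, head = _split_tail(raw)
--             # Attach tail (OUTLINE + IPs + L3-instance lines) to the *previous* area
--             if areas:
--                 areas[-1].extend(tail)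
--             # head is the start of the current area
--             areas.append(head)
--
--     return [a for a in areas if a]
-- ===== SOURCE B (Python) =====
-- def _split_capture_by_area(capture_list):
--     """Single-pass state machine: close an area right after an OUTLINE_NORMAL
--     and its trailing IP_ADDRESS_TAG / 'line' run, instead of raw-splitting and
--     re-attaching tails."""
--     def _is_outline(it):
--         return it[0] == 'shape' and it[1] == 'OUTLINE_NORMAL'
--
--     def _is_tail(it):
--         return (it[0] == 'shape' and it[1] == 'IP_ADDRESS_TAG') or it[0] == 'line'
--
--     areas = []
--     current = []
--     i = 0
--     n = len(capture_list)
--     while i < n: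
--         item = capture_list[i]
--         current.append(item)
--         i += 1
--         if _is_outline(item):
--             while i < n and _is_tail(capture_list[i]):
--                 current.append(capture_list[i])
--                 i += 1
--             areas.append(current)
--             current = []
--     if current:
--         areas.append(current)
--     return areas
-- ===== Notes on version B (the rewrite author's own statement) =====
-- stated objective: simpler
-- what changed: Replaces A's two-phase approach (raw-split the list at every OUTLINE_NORMAL, then re-attach each group's OUTLINE+IP/line tail to the previous area) with a single linear pass whose state machine closes an area immediately after the OUTLINE_NORMAL and its trailing IP_ADDRESS_TAG/'line' run.
import Mathlib
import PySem

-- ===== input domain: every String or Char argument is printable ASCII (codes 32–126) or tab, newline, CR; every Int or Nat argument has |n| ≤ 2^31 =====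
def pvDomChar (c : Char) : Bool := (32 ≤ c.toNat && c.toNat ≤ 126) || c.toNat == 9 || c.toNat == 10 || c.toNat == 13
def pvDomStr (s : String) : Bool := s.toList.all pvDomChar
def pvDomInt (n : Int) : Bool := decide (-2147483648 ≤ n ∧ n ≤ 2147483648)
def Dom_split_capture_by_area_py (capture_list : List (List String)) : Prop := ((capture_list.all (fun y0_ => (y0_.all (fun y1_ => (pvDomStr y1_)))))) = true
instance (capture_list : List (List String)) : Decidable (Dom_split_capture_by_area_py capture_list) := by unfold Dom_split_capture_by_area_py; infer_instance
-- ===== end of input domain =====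

-- B replaces A's two-phase "raw-split at OUTLINE then re-attach tails" by a single
-- linear pass that closes each area right after the OUTLINE_NORMAL and its trailing
-- IP_ADDRESS_TAG/'line' run (objective: simpler, same O(n) cost).

-- ===== PORT A =====
-- item[0] == 'shape' and item[1] == 'OUTLINE_NORMAL' (indexing total via getD; Pre_ excludes the raising items)
def pvIsOutline (it : List String) : Bool :=
  (it.getD 0 "" == "shape") && (it.getD 1 "" == "OUTLINE_NORMAL")

-- the two `while`-step tests of A's _split_tail (and the tests of B's inner loop)
def pvIsTail (it : List String) : Bool :=
  ((it.getD 0 "" == "shape") && (it.getD 1 "" == "IP_ADDRESS_TAG")) || (it.getD 0 "" == "line")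

-- body of A's first for-loop, state = (raw_groups, current)
def pvStep (st : List (List (List String)) × List (List String)) (item : List String) :
    List (List (List String)) × List (List String) :=
  if pvIsOutline item then (st.1 ++ [st.2], [item]) else (st.1, st.2 ++ [item])

-- the index i computed by _split_tail's while loop, minus the initial 1
def pvRunLen : List (List String) → Nat
  | [] => 0
  | it :: rest => if pvIsTail it then pvRunLen rest + 1 else 0

def pvSplitTail (items : List (List String)) : List (List String) × List (List String) :=
  match items with
  | [] => ([], [])
  | first :: rest =>
    if pvIsOutline first then
      let i := 1 + pvRunLen rest
      ((first :: rest).take i, (first :: rest).drop i)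
    else ([], first :: rest)

-- body of A's second for-loop over enumerate(raw_groups)
def pvStep2 (areas : List (List (List String))) (p : Int × List (List String)) :
    List (List (List String)) :=
  if p.1 = 0 then areas ++ [p.2]
  else
    let ts := pvSplitTail p.2
    let areas' := if areas = [] then areas else areas.dropLast ++ [areas.getLastD [] ++ ts.1]
    areas' ++ [ts.2]

def split_capture_by_area_py (capture_list : List (List String)) : List (List (List String)) :=
  let st := capture_list.foldl pvStep ([], [])
  let raw_groups := if st.2 = [] then st.1 else st.1 ++ [st.2]
  if raw_groups = [] then []
  else
    ((PySem.List.enumerate raw_groups 0).foldl pvStep2 []).filter (fun a => !a.isEmpty)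

-- ===== PORT B =====
-- B's inner while loop: consume the leading run of IP_ADDRESS_TAG/'line' items
def pvConsume : List (List String) → List (List String) × List (List String)
  | [] => ([], [])
  | it :: rest =>
    if pvIsTail it then
      let p := pvConsume rest
      (it :: p.1, p.2)
    else ([], it :: rest)

theorem pvConsume_eq (l : List (List String)) :
    pvConsume l = (l.takeWhile pvIsTail, l.dropWhile pvIsTail) := by
  induction l with
  | nil => simp [pvConsume]
  | cons it rest ih =>
    by_cases h : pvIsTail it <;> simp [pvConsume, List.takeWhile_cons, List.dropWhile_cons, h, ih]

-- B's outer while loop, state = (remaining items, current)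
def pvGoB : List (List String) → List (List String) → List (List (List String))
  | [], cur => if cur = [] then [] else [cur]
  | it :: rest, cur =>
    if pvIsOutline it then
      let c := pvConsume rest
      (cur ++ it :: c.1) :: pvGoB c.2 []
    else pvGoB rest (cur ++ [it])
termination_by l _ => l.length
decreasing_by
  · simp only [pvConsume_eq]
    exact Nat.lt_succ_of_le (List.length_dropWhile_le _ _)
  · simp

def split_capture_by_area_py_alt (capture_list : List (List String)) : List (List (List String)) :=
  pvGoB capture_list []

-- ===== PRECONDITION & SPEC =====
-- Pre_ excludes exactly the inputs where Python A raises IndexError: an empty item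
-- (item[0]), or an item whose first entry is 'shape' but which has no second entry (item[1]).
def Pre_split_capture_by_area_py (capture_list : List (List String)) : Prop :=
  ∀ it ∈ capture_list, it ≠ [] ∧ (it.headD "" = "shape" → 2 ≤ it.length)
instance (capture_list : List (List String)) : Decidable (Pre_split_capture_by_area_py capture_list) := by unfold Pre_split_capture_by_area_py; infer_instance

def pvWitness_split_capture_by_area_py : List (List String) :=
  [["shape", "OUTLINE_NORMAL"], ["line", "a"], ["shape", "DEVICE_NORMAL"]]

def Spec_split_capture_by_area_py (capture_list : List (List String)) (out : List (List (List String))) : Prop := out = split_capture_by_area_py_alt capture_list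
instance (capture_list : List (List String)) (out : List (List (List String))) : Decidable (Spec_split_capture_by_area_py capture_list out) := by unfold Spec_split_capture_by_area_py; infer_instance

-- ===== CLAIM (what is proved, stated in full; the proofs are below) =====
def Claim_equal_split_capture_by_area_py : Prop := ∀ (capture_list : List (List String)), Dom_split_capture_by_area_py capture_list → Pre_split_capture_by_area_py capture_list → Spec_split_capture_by_area_py capture_list (split_capture_by_area_py capture_list)

-- ===== LEMMAS AND PROOFS =====

-- recursive form of A's first loop
def pvRawRec : List (List String) → List (List String) → List (List (List String))
  | [], cur => if cur = [] then [] else [cur]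
  | x :: xs, cur => if pvIsOutline x then cur :: pvRawRec xs [x] else pvRawRec xs (cur ++ [x])

-- recursive form of A's second loop after the first (i = 0) group has been installed
def pvGo2 : List (List String) → List (List (List String)) → List (List (List String))
  | acc, [] => [acc]
  | acc, g :: gs => (acc ++ (pvSplitTail g).1) :: pvGo2 (pvSplitTail g).2 gs

def pvFilt (xs : List (List (List String))) : List (List (List String)) :=
  xs.filter (fun a => !a.isEmpty)

theorem outline_not_tail {o : List String} (h : pvIsOutline o = true) : pvIsTail o = false := by
  simp only [pvIsOutline, List.getD, Bool.and_eq_true, beq_iff_eq] at h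
  simp [pvIsTail, List.getD, h.1, h.2]

theorem foldl_pvStep_raw (l : List (List String)) :
    ∀ gs cur, ((l.foldl pvStep (gs, cur)).1 ++
        (if (l.foldl pvStep (gs, cur)).2 = [] then [] else [(l.foldl pvStep (gs, cur)).2]))
      = gs ++ pvRawRec l cur := by
  induction l with
  | nil =>
    intro gs cur
    by_cases h : cur = [] <;> simp [pvRawRec, h]
  | cons x xs ih =>
    intro gs cur
    by_cases h : pvIsOutline x <;>
      simp [pvStep, pvRawRec, h, List.foldl_cons, ih]

theorem foldl_pvStep2_ne (gs : List (List (List String)))  :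
    ∀ (s : Int), 1 ≤ s → ∀ (closed : List (List (List String))) acc,
      (PySem.List.enumerate gs s).foldl pvStep2 (closed ++ [acc]) = closed ++ pvGo2 acc gs := by
  induction gs with
  | nil => intro s _ closed acc; simp [PySem.List.enumerate_nil, pvGo2]
  | cons g gs ih =>
    intro s hs closed acc
    have hs0 : s ≠ 0 := by omega
    rw [PySem.List.enumerate_cons, List.foldl_cons]
    have hstep : pvStep2 (closed ++ [acc]) (s, g)
        = (closed ++ [acc ++ (pvSplitTail g).1]) ++ [(pvSplitTail g).2] := by
      simp [pvStep2, hs0]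
    rw [hstep, ih (s + 1) (by omega)]
    simp [pvGo2]

theorem pvRunLen_all {run : List (List String)} (h : ∀ y ∈ run, pvIsTail y = true)
    {p : List (List String)} (hp : pvIsTail (p.headD []) = false) :
    pvRunLen (run ++ p) = run.length := by
  induction run with
  | nil =>
    cases p with
    | nil => simp [pvRunLen]
    | cons a p' => simp at hp; simp [pvRunLen, hp]
  | cons y run' ih =>
    have hy := h y (by simp)
    simp [pvRunLen, hy, ih (fun z hz => h z (by simp [hz]))]

theorem pvSplitTail_group {o : List String} (ho : pvIsOutline o = true)
    {run p : List (List String)} (hrun : ∀ y ∈ run, pvIsTail y = true)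
    (hp : pvIsTail (p.headD []) = false) :
    pvSplitTail (o :: (run ++ p)) = (o :: run, p) := by
  have ht : (o :: (run ++ p)).take (1 + run.length) = o :: run := by
    rw [Nat.add_comm, List.take_succ_cons]
    simp [List.take_left]
  have hd : (o :: (run ++ p)).drop (1 + run.length) = p := by
    rw [Nat.add_comm, List.drop_succ_cons]
    simp [List.drop_left]
  simp [pvSplitTail, ho, pvRunLen_all hrun hp, ht, hd]

theorem pvFilt_cons_ne {x : List (List String)} (hx : x ≠ []) (xs) :
    pvFilt (x :: xs) = x :: pvFilt xs := by
  simp [pvFilt, List.filter_cons, hx]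

-- the bridge: A's rebuild-of-raw-groups equals B's single-pass machine
theorem pvBridge : ∀ n (xs : List (List String)), xs.length ≤ n →
    (∀ cur o run, pvIsOutline o = true → (∀ y ∈ run, pvIsTail y = true) →
      pvFilt (pvGo2 cur (pvRawRec xs (o :: run))) =
        (cur ++ o :: (run ++ xs.takeWhile pvIsTail)) :: pvGoB (xs.dropWhile pvIsTail) [])
    ∧
    (∀ cur o run p, pvIsOutline o = true → (∀ y ∈ run, pvIsTail y = true) → p ≠ [] →
        pvIsTail (p.headD []) = false →
      pvFilt (pvGo2 cur (pvRawRec xs (o :: (run ++ p)))) = (cur ++ o :: run) :: pvGoB xs p) := by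
  intro n
  induction n with
  | zero =>
    intro xs hxs
    have hx : xs = [] := List.length_eq_zero_iff.mp (Nat.le_zero.mp hxs)
    subst hx
    constructor
    · intro cur o run ho hrun
      have hsplit := pvSplitTail_group ho hrun (p := []) (by simp [pvIsTail])
      simp only [List.append_nil] at hsplit
      simp [pvRawRec, pvGo2, hsplit, pvFilt, List.filter_cons, pvGoB]
    · intro cur o run p ho hrun hp hph
      have hsplit := pvSplitTail_group ho hrun hph
      simp [pvRawRec, pvGo2, hsplit, pvFilt, List.filter_cons, hp, pvGoB]
  | succ n ih =>
    intro xs hxs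
    cases xs with
    | nil => exact ih [] (by simp)
    | cons y ys =>
      have hys : ys.length ≤ n := by simpa using hxs
      constructor
      · intro cur o run ho hrun
        by_cases hy : pvIsOutline y
        · have hyt : pvIsTail y = false := outline_not_tail hy
          have hsplit := pvSplitTail_group ho hrun (p := []) (by simp [pvIsTail])
          simp only [List.append_nil] at hsplit
          have hIH := (ih ys hys).1 [] y [] hy (by simp)
          simp only [pvRawRec, hy, if_pos, pvGo2, hsplit]
          rw [pvFilt_cons_ne (by simp)]
          rw [hIH]
          simp [pvGoB, hy, pvConsume_eq, List.takeWhile_cons, List.dropWhile_cons, hyt]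
        · by_cases hyt : pvIsTail y
          · have hIH := (ih ys hys).1 cur o (run ++ [y]) ho
              (by intro z hz; rcases List.mem_append.mp hz with h | h
                  · exact hrun z h
                  · simp at h; subst h; exact hyt)
            simp only [pvRawRec, hy, if_neg, Bool.false_eq_true, not_false_iff, if_false]
            have : (o :: run) ++ [y] = o :: (run ++ [y]) := by simp
            rw [this, hIH]
            simp [List.takeWhile_cons, List.dropWhile_cons, hyt]
          · have hIH := (ih ys hys).2 cur o run [y] ho hrun (by simp)
              (by simpa using (eq_false_of_ne_true hyt))
            simp only [pvRawRec, hy, Bool.false_eq_true, not_false_iff, if_false]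
            have : (o :: run) ++ [y] = o :: (run ++ [y]) := by simp
            rw [this, hIH]
            simp [pvGoB, hy, List.takeWhile_cons, List.dropWhile_cons, hyt]
      · intro cur o run p ho hrun hp hph
        by_cases hy : pvIsOutline y
        · have hsplit := pvSplitTail_group ho hrun hph
          have hIH := (ih ys hys).1 p y [] hy (by simp)
          simp only [pvRawRec, hy, if_pos, pvGo2, hsplit]
          rw [pvFilt_cons_ne (by simp)]
          rw [hIH]
          simp [pvGoB, hy, pvConsume_eq]
        · have hp' : p ++ [y] ≠ [] := by simp
          have hph' : pvIsTail ((p ++ [y]).headD []) = false := by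
            cases p with
            | nil => exact absurd rfl hp
            | cons a p' => simpa using hph
          have hIH := (ih ys hys).2 cur o run (p ++ [y]) ho hrun hp' hph'
          simp only [pvRawRec, hy, Bool.false_eq_true, not_false_iff, if_false]
          have : (o :: (run ++ p)) ++ [y] = o :: (run ++ (p ++ [y])) := by simp
          rw [this, hIH]
          cases p with
          | nil => exact absurd rfl hp
          | cons a p' => simp [pvGoB, hy]

theorem pvTop : ∀ (xs cur : List (List String)),
    pvFilt (match pvRawRec xs cur with | [] => [] | g :: gs => pvGo2 g gs) = pvGoB xs cur := by
  intro xs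
  induction xs with
  | nil =>
    intro cur
    by_cases h : cur = [] <;> simp [pvRawRec, h, pvGo2, pvFilt, List.filter_cons, pvGoB]
  | cons x xs ih =>
    intro cur
    by_cases hx : pvIsOutline x
    · have hIH := (pvBridge xs.length xs le_rfl).1 cur x [] hx (by simp)
      simp only [pvRawRec, hx, if_pos]
      rw [hIH]
      simp [pvGoB, hx, pvConsume_eq]
    · simp only [pvRawRec, hx, Bool.false_eq_true, not_false_iff, if_false]
      rw [ih (cur ++ [x])]
      simp [pvGoB, hx]

theorem pvA_eq (l : List (List String)) :
    split_capture_by_area_py l = split_capture_by_area_py_alt l := by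
  simp only [split_capture_by_area_py, split_capture_by_area_py_alt]
  have hraw := foldl_pvStep_raw l [] []
  simp only [List.nil_append] at hraw
  set st := l.foldl pvStep ([], []) with hst
  have hrg : (if st.2 = [] then st.1 else st.1 ++ [st.2]) = pvRawRec l [] := by
    by_cases h : st.2 = []
    · simpa [h] using hraw
    · simpa [h] using hraw
  rw [hrg]
  rcases hR : pvRawRec l [] with _ | ⟨g, gs⟩
  · rw [← pvTop l []]
    simp [hR, pvFilt]
  · have hne : g :: gs ≠ [] := by simp
    rw [if_neg hne]
    rw [PySem.List.enumerate_cons, List.foldl_cons]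
    have h0 : pvStep2 [] ((0 : Int), g) = [] ++ [g] := by simp [pvStep2]
    rw [h0]
    norm_num
    have h1 := foldl_pvStep2_ne gs 1 le_rfl [] g
    simp only [List.nil_append] at h1
    rw [h1]
    have := pvTop l []
    rw [hR] at this
    simpa [pvFilt] using this

-- ===== VERDICT (by name: the statement is the Claim_ definition above) =====
theorem split_capture_by_area_py_spec : Claim_equal_split_capture_by_area_py := by
  intro capture_list _ _
  unfold Spec_split_capture_by_area_py
  exact pvA_eq capture_list
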